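-- pv_equiv track=rewrite | github.com/Jordan231111/CodeForce-Solutions | probe_positions.py | medians_of_all_subarrays
-- ===== SOURCE A (Python) =====
-- def medians_of_all_subarrays(arr):
--     n = len(arr)
--     meds = set()
--     for L in range(n):
--         for R in range(L+1, n):  # length > 1
--             b = sorted(arr[L:R+1])
--             k = (len(b)+1)//2 - 1
--             meds.add(b[k])
--     return meds
-- ===== SOURCE B (Python) =====
-- def medians_of_all_subarrays(arr):
--     n = len(arr)
--     meds = set()
--     for L in range(n):
--         b = arr[L:L+1]  # sorted list of arr[L:R] maintained incrementally
--         for R in range(L+1, n):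
--             x = arr[R]
--             lo, hi = 0, len(b)
--             while lo < hi:  # rightmost insertion point by binary search
--                 mid = (lo + hi) // 2
--                 if x < b[mid]:
--                     hi = mid
--                 else:
--                     lo = mid + 1
--             b = b[:lo] + [x] + b[lo:]
--             meds.add(b[(len(b) + 1) // 2 - 1])
--     return meds
-- ===== Notes on version B (the rewrite author's own statement) =====
-- stated objective: faster
-- what changed: Instead of re-sorting every subarray arr[L:R+1] from scratch, B keeps for each L one sorted list and extends it per R by a binary-search insertion, reading the median from the maintained list.
import Mathlib
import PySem

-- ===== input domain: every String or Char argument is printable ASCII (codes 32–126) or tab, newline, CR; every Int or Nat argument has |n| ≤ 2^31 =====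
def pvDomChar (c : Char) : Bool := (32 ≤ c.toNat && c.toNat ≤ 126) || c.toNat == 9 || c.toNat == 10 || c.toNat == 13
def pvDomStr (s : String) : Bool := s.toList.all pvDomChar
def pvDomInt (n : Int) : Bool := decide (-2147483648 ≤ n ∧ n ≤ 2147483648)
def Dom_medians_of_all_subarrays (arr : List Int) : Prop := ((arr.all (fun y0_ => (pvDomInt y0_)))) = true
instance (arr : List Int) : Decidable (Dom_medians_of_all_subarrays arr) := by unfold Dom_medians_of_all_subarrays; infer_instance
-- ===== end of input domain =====

-- B keeps one sorted list per L and inserts arr[R] by binary search instead of re-sorting each subarray.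
-- A and B both return a Python set; the ports build the PySem.Set in the same (L,R) visiting order.

-- ===== PORT A =====
-- b[k] is always in range (the subarray is nonempty), so the IndexError-free total read pyGetD is exact here.
def medians_of_all_subarrays (arr : List Int) : List Int :=
  let n : Int := arr.length
  (PySem.List.pyRange 0 n 1).foldl (fun meds L =>
    (PySem.List.pyRange (L + 1) n 1).foldl (fun meds R =>
      let b := PySem.List.sorted (PySem.List.slice arr (some L) (some (R + 1))) (fun x => x) false
      let k := PySem.Int.floordiv ((b.length : Int) + 1) 2 - 1
      PySem.Set.add meds (PySem.List.pyGetD b k 0)) meds) []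

-- ===== PORT B =====
-- the while-loop 'lo, hi' binary search of Source B; b[mid] is always in range (mid < hi ≤ len b), so getD is exact
def pvBS (b : List Int) (x : Int) (lo hi : Nat) : Nat :=
  if h : lo < hi then
    let mid := (lo + hi) / 2
    if x < b.getD mid 0 then pvBS b x lo mid else pvBS b x (mid + 1) hi
  else lo
termination_by hi - lo
decreasing_by all_goals omega

-- b = b[:lo] + [x] + b[lo:]  (0 ≤ lo ≤ len b, so the slices are take/drop)
def pvIns (b : List Int) (x : Int) : List Int :=
  let lo := pvBS b x 0 b.length
  b.take lo ++ [x] ++ b.drop lo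

def medians_of_all_subarrays_alt (arr : List Int) : List Int :=
  let n : Int := arr.length
  (PySem.List.pyRange 0 n 1).foldl (fun meds L =>
    let b0 := PySem.List.slice arr (some L) (some (L + 1))
    let st := (PySem.List.pyRange (L + 1) n 1).foldl (fun (st : List Int × List Int) R =>
      let b' := pvIns st.1 (PySem.List.pyGetD arr R 0)
      let k := (b'.length + 1) / 2 - 1
      (b', PySem.Set.add st.2 (PySem.List.pyGetD b' (k : Int) 0))) (b0, meds)
    st.2) []

-- ===== PRECONDITION & SPEC =====
def Spec_medians_of_all_subarrays (arr : List Int) (out : List Int) : Prop := out = medians_of_all_subarrays_alt arr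
instance (arr : List Int) (out : List Int) : Decidable (Spec_medians_of_all_subarrays arr out) := by unfold Spec_medians_of_all_subarrays; infer_instance

-- ===== CLAIM (what is proved, stated in full; the proofs are below) =====
def Claim_equal_medians_of_all_subarrays : Prop := ∀ (arr : List Int), Dom_medians_of_all_subarrays arr → Spec_medians_of_all_subarrays arr (medians_of_all_subarrays arr)

-- ===== LEMMAS AND PROOFS =====

-- sorted reads: getD is monotone on a ≤-sorted list
lemma getD_mono (b : List Int) (hs : b.Pairwise (· ≤ ·)) {i j : Nat} (hij : i ≤ j) (hj : j < b.length) :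
    b.getD i 0 ≤ b.getD j 0 := by
  rcases Nat.eq_or_lt_of_le hij with rfl | hlt
  · exact le_refl _
  · rw [List.getD_eq_getElem b 0 (lt_of_le_of_lt hij hj), List.getD_eq_getElem b 0 hj]
    exact List.pairwise_iff_getElem.mp hs i j _ hj hlt

-- binary search: on a ≤-sorted b it returns the rightmost insertion point for x
lemma pvBS_spec (b : List Int) (x : Int) (hs : b.Pairwise (· ≤ ·)) :
    ∀ (d lo hi : Nat), hi - lo ≤ d → lo ≤ hi → hi ≤ b.length →
    (∀ i, i < lo → b.getD i 0 ≤ x) → (∀ i, hi ≤ i → i < b.length → x < b.getD i 0) →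
    pvBS b x lo hi ≤ b.length ∧ (∀ i, i < pvBS b x lo hi → b.getD i 0 ≤ x) ∧
      (∀ i, pvBS b x lo hi ≤ i → i < b.length → x < b.getD i 0) := by
  intro d
  induction d with
  | zero =>
    intro lo hi hd hle hlen hlo hhi
    have : hi = lo := by omega
    subst this
    rw [pvBS]; simp only [lt_irrefl, dite_false]
    exact ⟨hlen, hlo, fun i h1 h2 => hhi i h1 h2⟩
  | succ d ih =>
    intro lo hi hd hle hlen hlo hhi
    rw [pvBS]
    by_cases h : lo < hi
    · simp only [h, dite_true]
      by_cases hx : x < b.getD ((lo + hi) / 2) 0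
      · simp only [hx, if_true]
        refine ih lo ((lo + hi) / 2) (by omega) (by omega) (by omega) hlo ?_
        intro i h1 h2
        exact lt_of_lt_of_le hx (getD_mono b hs h1 h2)
      · simp only [hx, if_false]
        refine ih ((lo + hi) / 2 + 1) hi (by omega) (by omega) hlen ?_ hhi
        intro i h1
        exact le_trans (getD_mono b hs (by omega) (by omega)) (not_lt.mp hx)
    · simp only [h, dite_false]
      have : hi = lo := by omega
      subst this
      exact ⟨hlen, hlo, fun i h1 h2 => hhi i h1 h2⟩

lemma pvIns_length (b : List Int) (x : Int) : (pvIns b x).length = b.length + 1 := by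
  simp [pvIns]

lemma pvIns_perm (b : List Int) (x : Int) : (pvIns b x).Perm (b ++ [x]) := by
  unfold pvIns
  have h1 : List.take (pvBS b x 0 b.length) b ++ [x] ++ List.drop (pvBS b x 0 b.length) b
      = List.take (pvBS b x 0 b.length) b ++ ([x] ++ List.drop (pvBS b x 0 b.length) b) := by
    rw [List.append_assoc]
  rw [h1]
  have h2 := (List.perm_append_comm (l₁ := [x]) (l₂ := List.drop (pvBS b x 0 b.length) b)).append_left
      (List.take (pvBS b x 0 b.length) b)
  refine h2.trans ?_
  rw [← List.append_assoc, List.take_append_drop]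

lemma pvIns_pairwise (b : List Int) (x : Int) (hs : b.Pairwise (· ≤ ·)) :
    (pvIns b x).Pairwise (· ≤ ·) := by
  obtain ⟨hlen, hlow, hhigh⟩ := pvBS_spec b x hs b.length 0 b.length (by omega) (by omega) le_rfl
    (by omega) (by omega)
  set lo := pvBS b x 0 b.length with hlo
  unfold pvIns
  rw [← hlo]
  have htake : ∀ a ∈ b.take lo, a ≤ x := by
    intro a ha
    obtain ⟨i, hi, rfl⟩ := List.mem_iff_getElem.mp ha
    have hi' : i < lo ∧ i < b.length := by simpa using hi
    rw [List.getElem_take]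
    have h := hlow i hi'.1
    rwa [List.getD_eq_getElem b 0 hi'.2] at h
  have hdrop : ∀ c ∈ b.drop lo, x ≤ c := by
    intro c hc
    obtain ⟨i, hi, rfl⟩ := List.mem_iff_getElem.mp hc
    have hib : lo + i < b.length := by simp [List.length_drop] at hi; omega
    rw [List.getElem_drop]
    have h := hhigh (lo + i) (by omega) hib
    rw [List.getD_eq_getElem b 0 hib] at h
    exact le_of_lt h
  rw [List.append_assoc, List.pairwise_append]
  refine ⟨hs.sublist (List.take_sublist _ _), ?_, ?_⟩
  · rw [List.pairwise_append]
    refine ⟨List.pairwise_singleton _ _, hs.sublist (List.drop_sublist _ _), ?_⟩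
    intro a ha c hc
    simp at ha; subst ha
    exact hdrop c hc
  · intro a ha c hc
    rcases List.mem_append.mp hc with hc | hc
    · simp at hc; subst hc; exact htake a ha
    · exact le_trans (htake a ha) (hdrop c hc)

-- the heart of the equivalence: inserting x into sorted(s) is sorting s ++ [x]
lemma pvIns_sorted (s : List Int) (x : Int) :
    pvIns (PySem.List.sorted s (fun x => x) false) x = PySem.List.sorted (s ++ [x]) (fun x => x) false := by
  have hs := PySem.List.sorted_pairwise s (fun x => x)
  symm
  apply PySem.List.sorted_id_eq_of_perm_of_pairwise
  · exact (pvIns_perm _ x).trans ((PySem.List.sorted_perm s _ false).append_right [x])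
  · exact pvIns_pairwise _ x hs

-- extending the slice arr[L:R] by its next element
lemma slice_snoc (arr : List Int) (L R : Int) (h0 : 0 ≤ L) (hLR : L ≤ R) (hR : R < arr.length) :
    PySem.List.slice arr (some L) (some (R + 1)) =
      PySem.List.slice arr (some L) (some R) ++ [PySem.List.pyGetD arr R 0] := by
  rw [PySem.List.slice_toNat arr h0 (by omega), PySem.List.slice_toNat arr h0 (by omega)]
  have hRt : R.toNat < arr.length := by omega
  have h1 : (R + 1).toNat - L.toNat = (R.toNat - L.toNat) + 1 := by omega
  rw [h1, List.take_add_one]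
  congr 1
  have h2 : (List.drop L.toNat arr)[R.toNat - L.toNat]? = some arr[R.toNat] := by
    rw [List.getElem?_drop]
    have : L.toNat + (R.toNat - L.toNat) = R.toNat := by omega
    rw [this, List.getElem?_eq_getElem hRt]
  rw [h2, PySem.List.pyGetD_eq_getElem arr 0 (by omega) (by exact_mod_cast hR)]
  simp

-- the two Python index expressions pick the same element of the same list
lemma median_index_eq (m : Nat) (hm : 1 ≤ m) :
    (((m + 1) / 2 - 1 : Nat) : Int) = PySem.Int.floordiv ((m : Int) + 1) 2 - 1 := by
  have h : ((m : Int) + 1) = ((m + 1 : Nat) : Int) := by push_cast; ring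
  rw [h]
  have h2 : (2 : Int) = ((2 : Nat) : Int) := by norm_num
  rw [h2, PySem.Int.floordiv_natCast]
  omega

-- the inner loop over R, with the invariant b = sorted(arr[L:R0])
lemma inner_loop (arr : List Int) (L : Int) (h0 : 0 ≤ L) :
    ∀ (fuel : Nat) (R0 : Int) (meds b : List Int), ((arr.length : Int) - R0).toNat ≤ fuel → L < R0 →
      b = PySem.List.sorted (PySem.List.slice arr (some L) (some R0)) (fun x => x) false →
      ((PySem.List.pyRange R0 (arr.length : Int) 1).foldl (fun (st : List Int × List Int) R =>
        let b' := pvIns st.1 (PySem.List.pyGetD arr R 0)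
        let k := (b'.length + 1) / 2 - 1
        (b', PySem.Set.add st.2 (PySem.List.pyGetD b' (k : Int) 0))) (b, meds)).2
      = (PySem.List.pyRange R0 (arr.length : Int) 1).foldl (fun meds R =>
          let b := PySem.List.sorted (PySem.List.slice arr (some L) (some (R + 1))) (fun x => x) false
          let k := PySem.Int.floordiv ((b.length : Int) + 1) 2 - 1
          PySem.Set.add meds (PySem.List.pyGetD b k 0)) meds := by
  intro fuel
  induction fuel with
  | zero =>
    intro R0 meds b hf hLR hb
    have hempty : PySem.List.pyRange R0 (arr.length : Int) 1 = [] := by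
      apply List.eq_nil_iff_forall_not_mem.mpr
      intro x hx
      have := PySem.List.mem_pyRange_one.mp hx
      omega
    rw [hempty]; rfl
  | succ fuel ih =>
    intro R0 meds b hf hLR hb
    by_cases hR : R0 < (arr.length : Int)
    · rw [PySem.List.pyRange_one_cons hR, List.foldl_cons, List.foldl_cons]
      have hR' : R0 < arr.length := by exact_mod_cast hR
      have hsnoc := slice_snoc arr L R0 h0 (le_of_lt hLR) (by exact_mod_cast hR)
      have hb' : pvIns b (PySem.List.pyGetD arr R0 0)
          = PySem.List.sorted (PySem.List.slice arr (some L) (some (R0 + 1))) (fun x => x) false := by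
        rw [hb, pvIns_sorted, hsnoc]
      have hm : 1 ≤ (pvIns b (PySem.List.pyGetD arr R0 0)).length := by
        rw [pvIns_length]; omega
      have hmed : PySem.List.pyGetD (pvIns b (PySem.List.pyGetD arr R0 0))
            ((((pvIns b (PySem.List.pyGetD arr R0 0)).length + 1) / 2 - 1 : Nat) : Int) 0
          = PySem.List.pyGetD
              (PySem.List.sorted (PySem.List.slice arr (some L) (some (R0 + 1))) (fun x => x) false)
              (PySem.Int.floordiv
                (((PySem.List.sorted (PySem.List.slice arr (some L) (some (R0 + 1))) (fun x => x)
                    false).length : Int) + 1) 2 - 1) 0 := by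
        rw [median_index_eq _ hm, hb']
      simp only []
      rw [hmed]
      exact ih (R0 + 1) _ _ (by omega) (by omega) hb'
    · have hempty : PySem.List.pyRange R0 (arr.length : Int) 1 = [] := by
        apply List.eq_nil_iff_forall_not_mem.mpr
        intro x hx
        have := PySem.List.mem_pyRange_one.mp hx
        omega
      rw [hempty]; rfl

-- the starting list arr[L:L+1] is already sorted
lemma start_sorted (arr : List Int) (L : Int) (h0 : 0 ≤ L) :
    PySem.List.slice arr (some L) (some (L + 1))
      = PySem.List.sorted (PySem.List.slice arr (some L) (some (L + 1))) (fun x => x) false := by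
  symm
  apply PySem.List.sorted_eq_self_of_pairwise
  rw [PySem.List.slice_toNat arr h0 (by omega)]
  have h1 : (L + 1).toNat - L.toNat = 1 := by omega
  rw [h1]
  rcases List.drop L.toNat arr with _ | ⟨a, t⟩ <;> simp

-- ===== VERDICT (by name: the statement is the Claim_ definition above) =====
theorem medians_of_all_subarrays_spec : Claim_equal_medians_of_all_subarrays := by
  intro arr _
  unfold Spec_medians_of_all_subarrays medians_of_all_subarrays medians_of_all_subarrays_alt
  simp only []
  apply PySem.List.foldl_congr_mem
  intro meds L hL
  have hL' := (PySem.List.mem_pyRange_one.mp hL).1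
  exact (inner_loop arr L hL' _ (L + 1) meds _ le_rfl (by omega)
    (start_sorted arr L hL')).symm
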